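-- pv_equiv track=rewrite | github.com/ejs/AoC2021 | day_14.py | recurse_polymer
-- ===== SOURCE A (Python) =====
-- def recurse_polymer(polymer, rules, depth):
--     if not depth:
--         yield from polymer
--     else:
--         a = ""
--         for b in recurse_polymer(polymer, rules, depth-1):
--             pair = a+b
--             if pair in rules:
--                 yield rules[pair]
--             yield b
--             a = b
-- ===== SOURCE B (Python) =====
-- def recurse_polymer(polymer, rules, depth):
--     def between(a, b, d):
--         if d and (a + b) in rules:
--             m = rules[a + b]
--             yield from between(a, m, d - 1)
--             yield m
--             yield from between(m, b, d - 1)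
--     elems = list(polymer)
--     for a, b in zip([""] + elems, elems):
--         yield from between(a, b, depth)
--         yield b
-- ===== Notes on version B (the rewrite author's own statement) =====
-- stated objective: alternative
-- what changed: Replaces A's level-by-level recursion (each depth level re-sweeps the whole sequence) with a divide-and-conquer recursion on adjacent pairs: a `between(a,b,depth)` generator expands each pair independently to full depth, and the output is stitched pairwise in one walk.
import Mathlib
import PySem

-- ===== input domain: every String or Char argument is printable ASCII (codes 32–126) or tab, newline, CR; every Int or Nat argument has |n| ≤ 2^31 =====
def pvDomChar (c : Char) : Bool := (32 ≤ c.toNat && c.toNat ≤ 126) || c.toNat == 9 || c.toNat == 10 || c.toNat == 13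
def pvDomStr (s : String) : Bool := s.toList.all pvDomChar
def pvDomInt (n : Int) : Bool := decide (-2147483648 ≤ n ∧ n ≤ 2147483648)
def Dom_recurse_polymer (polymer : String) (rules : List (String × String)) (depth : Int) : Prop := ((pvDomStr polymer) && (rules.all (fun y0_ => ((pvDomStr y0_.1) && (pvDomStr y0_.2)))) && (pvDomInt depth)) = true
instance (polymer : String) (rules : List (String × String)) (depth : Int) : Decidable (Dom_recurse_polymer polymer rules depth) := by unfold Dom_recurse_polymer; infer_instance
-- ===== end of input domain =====

-- B replaces A's level-by-level recursion with a divide-and-conquer expansion of each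
-- adjacent pair to full depth; equivalence of the RETURN (list of yielded strings).

-- ===== PORT A =====
-- one expansion level of A: the inner `for b in …` loop, as a fold carrying (output so far, a)
def pvStepA (rules : List (String × String)) (st : List String × String) (b : String) : List String × String :=
  let pair := st.2 ++ b
  (match (PySem.Dict.mk rules).get? pair with
   | some v => st.1 ++ [v] ++ [b]
   | none => st.1 ++ [b], b)

-- the recursion of A, on a Nat fuel equal to depth (A returns only for depth ≥ 0)
def recursePolyA (rules : List (String × String)) : Nat → List String → List String
  | 0, poly => poly
  | n+1, poly => (((recursePolyA rules n poly)).foldl (pvStepA rules) ([], "")).1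

def recurse_polymer (polymer : String) (rules : List (String × String)) (depth : Int) : List String :=
  recursePolyA rules depth.toNat (polymer.toList.map (fun c => String.singleton c))

-- ===== PORT B =====
-- B's `between(a, b, d)` generator: the elements strictly between a and b after d steps
def pvBetween (rules : List (String × String)) : Nat → String → String → List String
  | 0, _, _ => []
  | Nat.succ d, a, b =>
    match (PySem.Dict.mk rules).get? (a ++ b) with
    | some m => pvBetween rules d a m ++ [m] ++ pvBetween rules d m b
    | none => []

-- the outer `for a, b in zip([""] + elems, elems)` walk
def recurse_polymer_alt (polymer : String) (rules : List (String × String)) (depth : Int) : List String :=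
  let elems := polymer.toList.map (fun c => String.singleton c)
  (("" :: elems).zip elems).flatMap (fun p => pvBetween rules depth.toNat p.1 p.2 ++ [p.2])

-- ===== PRECONDITION & SPEC =====
-- Pre_: A recurses on depth-1 without a base case below 0, so negative depth raises RecursionError.
def Pre_recurse_polymer (_polymer : String) (_rules : List (String × String)) (depth : Int) : Prop := 0 ≤ depth
instance (polymer : String) (rules : List (String × String)) (depth : Int) : Decidable (Pre_recurse_polymer polymer rules depth) := by unfold Pre_recurse_polymer; infer_instance

def pvWitness_recurse_polymer : String × (List (String × String)) × Int := ("NNCB", [("NC", "B"), ("CB", "H"), ("NN", "C")], 2)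

def Spec_recurse_polymer (polymer : String) (rules : List (String × String)) (depth : Int) (out : List String) : Prop := out = recurse_polymer_alt polymer rules depth
instance (polymer : String) (rules : List (String × String)) (depth : Int) (out : List String) : Decidable (Spec_recurse_polymer polymer rules depth out) := by unfold Spec_recurse_polymer; infer_instance

-- ===== CLAIM =====
def Claim_equal_recurse_polymer : Prop := ∀ (polymer : String) (rules : List (String × String)) (depth : Int), Dom_recurse_polymer polymer rules depth → Pre_recurse_polymer polymer rules depth → Spec_recurse_polymer polymer rules depth (recurse_polymer polymer rules depth)

-- ===== LEMMAS AND PROOFS =====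
-- the insertion A makes between adjacent elements a, b in one pass
def pvIns (rules : List (String × String)) (a b : String) : List String :=
  match (PySem.Dict.mk rules).get? (a ++ b) with
  | some v => [v]
  | none => []

-- one pass of A over a sequence whose left neighbour is a
def pvP (rules : List (String × String)) : String → List String → List String
  | _, [] => []
  | a, b :: rest => pvIns rules a b ++ [b] ++ pvP rules b rest

-- B's pairwise expansion, over a sequence whose left neighbour is a
def pvG (rules : List (String × String)) (n : Nat) : String → List String → List String
  | _, [] => []
  | a, b :: rest => pvBetween rules n a b ++ [b] ++ pvG rules n b rest

theorem pvStepA_eq (rules : List (String × String)) (acc : List String) (a b : String) :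
    pvStepA rules (acc, a) b = (acc ++ pvIns rules a b ++ [b], b) := by
  simp only [pvStepA, pvIns]
  cases (PySem.Dict.mk rules).get? (a ++ b) <;> simp

theorem foldA_eq_P (rules : List (String × String)) (elems : List String) :
    ∀ (acc : List String) (a : String),
      (elems.foldl (pvStepA rules) (acc, a)).1 = acc ++ pvP rules a elems := by
  induction elems with
  | nil => intro acc a; simp [pvP]
  | cons b rest ih =>
      intro acc a
      simp only [List.foldl_cons, pvStepA_eq, pvP, ih]
      simp

theorem pvBetween_zero (rules : List (String × String)) (a b : String) :
    pvBetween rules 0 a b = [] := rfl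

theorem pvBetween_none (rules : List (String × String)) (n : Nat) (a b : String)
    (h : (PySem.Dict.mk rules).get? (a ++ b) = none) :
    pvBetween rules n a b = [] := by
  cases n with
  | zero => rfl
  | succ d => simp [pvBetween, h]

theorem pvG_zero (rules : List (String × String)) (elems : List String) :
    ∀ a, pvG rules 0 a elems = elems := by
  induction elems with
  | nil => intro a; rfl
  | cons b rest ih => intro a; simp [pvG, pvBetween_zero, ih]

theorem pvG_succ (rules : List (String × String)) (n : Nat) (elems : List String) :
    ∀ a, pvG rules (n+1) a elems = pvG rules n a (pvP rules a elems) := by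
  induction elems with
  | nil => intro a; rfl
  | cons b rest ih =>
      intro a
      simp only [pvP, pvG, pvIns, pvBetween]
      cases h : (PySem.Dict.mk rules).get? (a ++ b) with
      | none => simp [pvG, pvBetween_none rules n a b h, ih]
      | some m => simp [pvG, ih]

theorem recursePolyA_succ_shift (rules : List (String × String)) (n : Nat) :
    ∀ elems, recursePolyA rules (n+1) elems
      = recursePolyA rules n ((elems.foldl (pvStepA rules) ([], "")).1) := by
  induction n with
  | zero => intro elems; rfl
  | succ n ih =>
      intro elems
      show (((recursePolyA rules (n+1) elems)).foldl (pvStepA rules) ([], "")).1 = _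
      rw [ih elems]
      rfl

theorem recursePolyA_eq_G (rules : List (String × String)) (n : Nat) :
    ∀ elems, recursePolyA rules n elems = pvG rules n "" elems := by
  induction n with
  | zero => intro elems; exact (pvG_zero rules elems "").symm
  | succ n ih =>
      intro elems
      rw [recursePolyA_succ_shift, ih, foldA_eq_P, pvG_succ]
      simp

theorem zipFlat_eq_G (rules : List (String × String)) (n : Nat) (elems : List String) :
    ∀ a, ((a :: elems).zip elems).flatMap (fun p => pvBetween rules n p.1 p.2 ++ [p.2])
      = pvG rules n a elems := by
  induction elems with
  | nil => intro a; rfl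
  | cons b rest ih => intro a; simp [List.zip_cons_cons, pvG, ih]

-- ===== VERDICT =====
theorem recurse_polymer_spec : Claim_equal_recurse_polymer := by
  intro polymer rules depth _ _
  unfold Spec_recurse_polymer recurse_polymer recurse_polymer_alt
  rw [recursePolyA_eq_G, zipFlat_eq_G]
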